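-- pv_equiv track=rewrite | github.com/suyan/artificial-intelligence-learning | homework3/code/hw3cs561s16.py | generate_boolean
-- ===== SOURCE A (Python) =====
-- def generate_boolean(num, l):
--     values = []
--     for i in range(l):
--         if (num >> i) & 1 == 0:
--             values.append('+')
--         else:
--             values.append('-')
--     return values
-- ===== SOURCE B (Python) =====
-- def generate_boolean(num, l):
--     if l <= 0:
--         return []
--     s = format(num & ((1 << l) - 1), '0{}b'.format(l))
--     return list(s[::-1].translate(str.maketrans('01', '+-')))
-- ===== Notes on version B (the rewrite author's own statement) =====
-- stated objective: idiomatic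
-- what changed: Replaces the per-bit conditional append loop with one bulk computation: mask the low l bits, render them as a zero-padded binary string, reverse it, and map chars 0/1 to +/- with a translation table.
import Mathlib
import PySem

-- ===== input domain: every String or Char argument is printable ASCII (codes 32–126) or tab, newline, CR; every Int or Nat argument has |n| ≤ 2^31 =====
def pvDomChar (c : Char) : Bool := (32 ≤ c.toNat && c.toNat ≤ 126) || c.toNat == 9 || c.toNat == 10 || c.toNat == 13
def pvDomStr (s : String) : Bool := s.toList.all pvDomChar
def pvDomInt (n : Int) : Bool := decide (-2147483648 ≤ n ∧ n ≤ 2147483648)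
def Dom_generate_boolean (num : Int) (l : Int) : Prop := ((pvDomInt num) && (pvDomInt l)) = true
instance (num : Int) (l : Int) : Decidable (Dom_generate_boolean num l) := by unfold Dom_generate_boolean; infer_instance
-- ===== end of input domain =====

-- B replaces A's per-bit conditional append loop by masking the low l bits, rendering them
-- as a zero-padded binary string, reversing it and mapping '0'/'1' to "+"/"-" (idiomatic bulk mapping).

-- ===== PORT A =====
def generate_boolean (num : Int) (l : Int) : List String :=
  (PySem.List.pyRange 0 l 1).foldl
    (fun values i =>
      if PySem.Int.band (num >>> i.toNat) 1 == 0 then values ++ ["+"] else values ++ ["-"])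
    []

-- ===== PORT B =====
-- zero-padded binary rendering of m with exactly k digits, MSB first (= format(m, '0kb') for m < 2^k)
def pvBinChars : Nat → Nat → List Char
  | _, 0 => []
  | m, k+1 => pvBinChars (m / 2) k ++ [if m % 2 == 1 then '1' else '0']

def generate_boolean_alt (num : Int) (l : Int) : List String :=
  if l ≤ 0 then []
  else
    let m := (PySem.Int.band num (((1 : Int) <<< l.toNat) - 1)).toNat
    (pvBinChars m l.toNat).reverse.map (fun c => if c == '1' then "-" else "+")

-- ===== PRECONDITION & SPEC =====
def Spec_generate_boolean (num : Int) (l : Int) (out : List String) : Prop := out = generate_boolean_alt num l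
instance (num : Int) (l : Int) (out : List String) : Decidable (Spec_generate_boolean num l out) := by unfold Spec_generate_boolean; infer_instance

-- ===== CLAIM (what is proved, stated in full; the proofs are below) =====
def Claim_equal_generate_boolean : Prop := ∀ (num : Int) (l : Int), Dom_generate_boolean num l → Spec_generate_boolean num l (generate_boolean num l)

-- ===== LEMMAS AND PROOFS =====

-- Python's  n & (2^k - 1)  is  n mod 2^k  (also for negative n).
theorem pv_band_mask (k : Nat) (n : Int) :
    PySem.Int.band n ((2:Int)^k - 1) = n % (2^k : Int) := by
  have hP : (0:Int) < 2^k := by positivity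
  have hb : (0:Int) ≤ (2:Int)^k - 1 := by omega
  have hPt : ((2:Int)^k - 1).toNat = 2^k - 1 := by
    have : ((2:Int)^k) = ((2^k : Nat) : Int) := by push_cast; ring
    omega
  unfold PySem.Int.band
  by_cases hn : 0 ≤ n
  · rw [if_pos hn, if_pos hb, hPt, Nat.and_two_pow_sub_one_eq_mod]
    push_cast [Int.toNat_of_nonneg hn]
    ring_nf
  · rw [if_neg hn, if_pos hb, hPt, Nat.land_comm, Nat.and_two_pow_sub_one_eq_mod]
    set p : Nat := (-n - 1).toNat with hp
    have hnp : n = -(p:Int) - 1 := by omega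
    have hmod : ((p % 2^k : Nat) : Int) = (p:Int) % ((2:Int)^k) := by
      push_cast; ring_nf
    have hlt : (p:Int) % ((2:Int)^k) < 2^k := Int.emod_lt_of_pos _ hP
    have hge : (0:Int) ≤ (p:Int) % ((2:Int)^k) := Int.emod_nonneg _ (by omega)
    have hdiv := Int.ediv_add_emod (p:Int) ((2:Int)^k)
    have hEq : n = ((2:Int)^k - 1 - (p:Int) % ((2:Int)^k)) + (2:Int)^k * (-(1 + (p:Int) / ((2:Int)^k))) := by
      rw [hnp]; linear_combination hdiv
    have hL : n % ((2:Int)^k) = (2:Int)^k - 1 - (p:Int) % ((2:Int)^k) := by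
      conv_lhs => rw [hEq]
      rw [Int.add_mul_emod_self_left, Int.emod_eq_of_lt (by omega) (by omega)]
    rw [hL, ← hmod]
    have h2c : ((2^k : Nat) : Int) = (2:Int)^k := by push_cast; ring
    have hple : p % 2^k < 2^k := Nat.mod_lt p (by positivity)
    omega

-- folding "append one sign per element" is mapping
theorem pv_foldl_pm {α : Type} (P : α → Bool) (xs : List α) (acc : List String) :
    xs.foldl (fun v i => if P i then v ++ ["+"] else v ++ ["-"]) acc
      = acc ++ xs.map (fun i => if P i then "+" else "-") := by
  induction xs generalizing acc with
  | nil => simp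
  | cons x xs ih => simp only [List.foldl_cons, List.map_cons, ih]; split_ifs <;> simp

-- A computes the sign of bit i of num, for i = 0..l-1
theorem pv_A_eq_map (num l : Int) :
    generate_boolean num l
      = (List.range l.toNat).map (fun i => if (num / 2^i) % 2 == 0 then "+" else "-") := by
  unfold generate_boolean
  rw [PySem.List.pyRange_one, pv_foldl_pm]
  simp only [List.map_map, List.nil_append, Int.sub_zero]
  apply List.map_congr_left
  intro k _
  simp only [Function.comp_apply]
  have h1 : (0 + (k:Int)).toNat = k := by omega
  rw [h1, Int.shiftRight_natCast_right num k]
  have h2 : PySem.Int.band (num >>> k) 1 = (num >>> k) % 2 := by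
    have := pv_band_mask 1 (num >>> k); simpa using this
  rw [h2, Int.shiftRight_eq_div_pow]
  norm_cast

-- n % 2^(k+1) splits into low bit and the rest
theorem pv_emod_split (k : Nat) (n : Int) :
    n % ((2:Int)^(k+1)) = n % 2 + 2 * ((n / 2) % ((2:Int)^k)) := by
  have hP : (0:Int) < 2^k := by positivity
  have h2 := Int.ediv_add_emod n 2
  have hq := Int.ediv_add_emod (n / 2) ((2:Int)^k)
  have hr0 : 0 ≤ n % 2 := Int.emod_nonneg _ (by omega)
  have hr1 : n % 2 < 2 := Int.emod_lt_of_pos _ (by omega)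
  have hs0 : 0 ≤ (n / 2) % ((2:Int)^k) := Int.emod_nonneg _ (by omega)
  have hs1 : (n / 2) % ((2:Int)^k) < 2^k := Int.emod_lt_of_pos _ hP
  have hEq : n = (n % 2 + 2 * ((n / 2) % ((2:Int)^k))) + (2:Int)^(k+1) * ((n / 2) / ((2:Int)^k)) := by
    rw [pow_succ]; linear_combination -h2 - 2 * hq
  conv_lhs => rw [hEq]
  rw [Int.add_mul_emod_self_left, Int.emod_eq_of_lt (by omega) (by rw [pow_succ]; omega)]

-- main bridge: B's reversed binary string of (n mod 2^k) maps to A's per-bit signs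
theorem pv_main (k : Nat) (n : Int) :
    (pvBinChars ((n % ((2:Int)^k)).toNat) k).reverse.map (fun c => if c == '1' then "-" else "+")
      = (List.range k).map (fun i => if (n / 2^i) % 2 == 0 then "+" else "-") := by
  induction k generalizing n with
  | zero => simp [pvBinChars]
  | succ k ih =>
    have hP : (0:Int) < 2^k := by positivity
    have hsplit := pv_emod_split k n
    have hr0 : 0 ≤ n % 2 := Int.emod_nonneg _ (by omega)
    have hr1 : n % 2 < 2 := Int.emod_lt_of_pos _ (by omega)
    have hs0 : 0 ≤ (n / 2) % ((2:Int)^k) := Int.emod_nonneg _ (by omega)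
    set m : Nat := (n % ((2:Int)^(k+1))).toNat with hm
    have hm2 : m % 2 = (n % 2).toNat := by omega
    have hmd : m / 2 = ((n / 2) % ((2:Int)^k)).toNat := by omega
    simp only [pvBinChars, List.reverse_append, List.reverse_singleton, List.singleton_append,
      List.map_cons, List.range_succ_eq_map, List.map_map]
    congr 1
    · -- head
      rcases (by omega : n % 2 = 0 ∨ n % 2 = 1) with h | h <;> simp [hm2, h]
    · -- tail
      rw [hmd, ih (n / 2)]
      apply List.map_congr_left
      intro i _
      simp only [Function.comp_apply]
      have hstep : n / 2^(i+1) = (n / 2) / 2^i := by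
        rw [pow_succ']; exact (Int.ediv_ediv_of_nonneg (by omega : (0:Int) ≤ 2)).symm
      simp [Nat.succ_eq_add_one, hstep]

-- ===== VERDICT (by name: the statement is the Claim_ definition above) =====
theorem generate_boolean_spec : Claim_equal_generate_boolean := by
  unfold Claim_equal_generate_boolean
  intro num l _
  unfold Spec_generate_boolean generate_boolean_alt
  by_cases hl : l ≤ 0
  · simp only [hl, if_true]
    unfold generate_boolean
    rw [PySem.List.pyRange_one_eq_nil (by omega)]
    simp
  · simp only [hl, if_false]
    have hmask : ((1:Int) <<< l.toNat) - 1 = (2:Int)^l.toNat - 1 := by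
      rw [Int.shiftLeft_eq]; ring
    rw [pv_A_eq_map, hmask, pv_band_mask]
    exact (pv_main l.toNat num).symm
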